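-- pv_equiv track=rewrite | github.com/ariedaze/CodingTest | 김재유/12.프로그래머스 실전연습/prog_124나라의숫자.py | solution
-- ===== SOURCE A (Python) =====
-- from itertools import product
--
-- def solution(n):
--     my_num = [1, 2, 4]
--     my_list = []
--     i = 1
--     sumnum = 0
--     while sumnum < n:
--         sumnum += 3**i
--         i += 1
--
--     for i in range(1, i):
--         my_list += list(map(list, product(my_num, repeat=i)))
--     return ''.join(map(str,my_list[n-1]))
-- ===== SOURCE B (Python) =====
-- def solution(n):
--     s = []
--     while n > 0:
--         n -= 1
--         s.append("124"[n % 3])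
--         n //= 3
--     return ''.join(reversed(s))
-- ===== Notes on version B (the rewrite author's own statement) =====
-- stated objective: faster
-- what changed: A enumerates every base-{1,2,4} numeral up to n by materialising all itertools.product tuples of each length and indexes into that O(n)-sized list; B computes the digits directly by bijective base-3 arithmetic (n-=1; digit='124'[n%3]; n//=3) in O(log n) with no list at all.
import Mathlib
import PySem

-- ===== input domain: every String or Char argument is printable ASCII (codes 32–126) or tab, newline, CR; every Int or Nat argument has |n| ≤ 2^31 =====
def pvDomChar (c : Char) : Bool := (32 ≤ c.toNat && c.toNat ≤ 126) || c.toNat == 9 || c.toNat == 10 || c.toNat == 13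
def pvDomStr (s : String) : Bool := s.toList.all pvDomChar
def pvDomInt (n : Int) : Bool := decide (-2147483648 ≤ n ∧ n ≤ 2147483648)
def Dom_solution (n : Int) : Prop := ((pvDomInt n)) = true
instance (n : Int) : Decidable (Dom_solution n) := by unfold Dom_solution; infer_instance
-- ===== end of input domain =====

-- B replaces A's O(n) enumeration of all length-k words over {1,2,4} (itertools.product)
-- by direct bijective base-3 digit extraction, O(log n) (objective: faster, asymptotic).

-- ===== PORT A =====
-- itertools.product(my_num, repeat=k) per its documented equivalent: result = [[]];
-- for each of the k pools: result = [x+[y] for x in result for y in my_num].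
def pvProdRep : Nat → List (List Int)
  | 0 => [[]]
  | k + 1 => (pvProdRep k).flatMap (fun w => [(1 : Int), 2, 4].map (fun d => w ++ [d]))

-- the while loop: while sumnum < n: sumnum += 3**i; i += 1
def pvLoopA (n sumnum : Int) (i : Nat) : Nat :=
  if sumnum < n then pvLoopA n (sumnum + 3 ^ i) (i + 1) else i
termination_by (n - sumnum).toNat
decreasing_by
  exact (Int.toNat_lt_toNat (Int.sub_pos.mpr (by assumption))).mpr
    (sub_lt_sub_left (lt_add_of_pos_right sumnum (pow_pos (by decide) i)) n)

def solution (n : Int) : String :=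
  match PySem.List.pyGet? ((List.range' 1 (pvLoopA n 0 1 - 1)).flatMap pvProdRep) (n - 1) with
  | some w => PySem.Str.join "" (w.map PySem.Int.toStr)   -- ''.join(map(str, my_list[n-1]))
  | none => ""                                            -- IndexError in Python; excluded by Pre_

-- ===== PORT B =====
-- while n > 0: n -= 1; s.append("124"[n % 3]); n //= 3
def pvLoopB (n : Int) (s : List Char) : List Char :=
  if n > 0 then
    pvLoopB (PySem.Int.floordiv (n - 1) 3)
      (s ++ [(PySem.Str.pyGet? "124" (PySem.Int.mod (n - 1) 3)).getD ' '])
  else s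
termination_by n.toNat
decreasing_by
  refine (Int.toNat_lt_toNat (by assumption)).mpr ?_
  rw [PySem.Int.floordiv_eq_ediv_of_pos (by decide : (0:Int) < 3)]
  exact lt_of_le_of_lt (Int.ediv_le_self 3 (by omega)) (sub_one_lt n)

def solution_alt (n : Int) : String := String.ofList ((pvLoopB n []).reverse)  -- ''.join(reversed(s))

-- ===== PRECONDITION & SPEC =====
-- For n ≤ 0 the Python A raises IndexError at my_list[n-1]; Pre_ excludes exactly those.
def Pre_solution (n : Int) : Prop := 1 ≤ n
instance (n : Int) : Decidable (Pre_solution n) := by unfold Pre_solution; infer_instance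
def pvWitness_solution : Int := 5

def Spec_solution (n : Int) (out : String) : Prop := out = solution_alt n
instance (n : Int) (out : String) : Decidable (Spec_solution n out) := by unfold Spec_solution; infer_instance

-- ===== CLAIM (what is proved, stated in full; the proofs are below) =====
def Claim_equal_solution : Prop := ∀ (n : Int), Dom_solution n → Pre_solution n → Spec_solution n (solution n)

-- ===== LEMMAS AND PROOFS =====

-- digit r of bijective base 3 (r = (n-1) % 3) as the Int 1/2/4 resp. the char '1'/'2'/'4'
def pvDig (r : Nat) : Int := if r = 0 then 1 else if r = 1 then 2 else 4
def pvCh (r : Nat) : Char := if r = 0 then '1' else if r = 1 then '2' else '4'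

-- the word for n in the global enumeration (bijective base 3 with digits 1,2,4)
def pvWord : Nat → List Int
  | 0 => []
  | m + 1 => pvWord (m / 3) ++ [pvDig (m % 3)]
decreasing_by exact Nat.lt_succ_of_le (Nat.div_le_self m 3)

def pvCWord : Nat → List Char
  | 0 => []
  | m + 1 => pvCWord (m / 3) ++ [pvCh (m % 3)]
decreasing_by exact Nat.lt_succ_of_le (Nat.div_le_self m 3)

-- S k = 3 + 9 + … + 3^k, the number of words of length ≤ k
def pvS : Nat → Nat
  | 0 => 0
  | k + 1 => pvS k + 3 ^ (k + 1)

lemma pvWord_succ (m : Nat) : pvWord (m + 1) = pvWord (m / 3) ++ [pvDig (m % 3)] := by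
  rw [pvWord]

lemma pvCWord_succ (m : Nat) : pvCWord (m + 1) = pvCWord (m / 3) ++ [pvCh (m % 3)] := by
  rw [pvCWord]

lemma pvWord_zero : pvWord 0 = [] := by rw [pvWord]

lemma pvCWord_zero : pvCWord 0 = [] := by rw [pvCWord]

lemma pvS_succ3 (k : Nat) : pvS (k + 1) = 3 * (pvS k + 1) := by
  induction k with
  | zero => rfl
  | succ k ih =>
    have h : (3:Nat) ^ (k + 2) = 3 * 3 ^ (k + 1) := by ring
    calc pvS (k + 2) = pvS (k + 1) + 3 ^ (k + 2) := rfl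
      _ = 3 * (pvS k + 1) + 3 * 3 ^ (k + 1) := by rw [ih, h]
      _ = 3 * (pvS (k + 1) + 1) := by show _ = 3 * ((pvS k + 3 ^ (k+1)) + 1); ring

lemma flat3_length (L : List (List Int)) :
    (L.flatMap (fun w => [(1 : Int), 2, 4].map (fun d => w ++ [d]))).length = 3 * L.length := by
  induction L with
  | nil => rfl
  | cons w L ih => simp only [List.flatMap_cons, List.length_append, ih, List.length_cons]; simp; omega

lemma prodRep_length (k : Nat) : (pvProdRep k).length = 3 ^ k := by
  induction k with
  | zero => rfl
  | succ k ih => rw [pvProdRep, flat3_length, ih]; ring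

lemma flat3_get (L : List (List Int)) (j : Nat) :
    (L.flatMap (fun w => [(1 : Int), 2, 4].map (fun d => w ++ [d])))[j]? =
      (L[j / 3]?).map (fun w => w ++ [pvDig (j % 3)]) := by
  induction L generalizing j with
  | nil => simp
  | cons w L ih =>
    rw [List.flatMap_cons]
    simp only [List.map_cons, List.map_nil] at ih ⊢
    by_cases h : j < 3
    · interval_cases j <;> simp [pvDig]
    · rw [List.getElem?_append_right (by simp; omega)]
      simp only [List.length_cons, List.length_nil, Nat.reduceAdd]
      rw [ih (j - 3)]
      have h1 : (j - 3) / 3 = j / 3 - 1 := by omega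
      have h2 : (j - 3) % 3 = j % 3 := by omega
      obtain ⟨k, hk⟩ : ∃ k, j / 3 = k + 1 := ⟨j / 3 - 1, by omega⟩
      rw [h1, h2, hk]
      simp

lemma prodRep_get (k : Nat) : ∀ j : Nat, j < 3 ^ (k + 1) →
    (pvProdRep (k + 1))[j]? = some (pvWord (pvS k + j + 1)) := by
  induction k with
  | zero =>
    intro j hj
    interval_cases j <;>
      · show (pvProdRep 1)[_]? = _
        rw [show pvProdRep 1 = [[1],[2],[4]] from rfl]
        rw [pvWord_succ]
        simp [pvS, pvDig, pvWord_zero]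
  | succ k ih =>
    intro j hj
    rw [show pvProdRep (k + 2) =
        (pvProdRep (k + 1)).flatMap (fun w => [(1 : Int), 2, 4].map (fun d => w ++ [d])) from rfl]
    rw [flat3_get]
    have h3 : (3:Nat) ^ (k + 2) = 3 ^ (k + 1) * 3 := by ring
    have hj3 : j / 3 < 3 ^ (k + 1) := by omega
    rw [ih (j / 3) hj3]
    simp only [Option.map_some]
    congr 1
    have hs : pvS (k + 1) = 3 * (pvS k + 1) := pvS_succ3 k
    conv_rhs => rw [show pvS (k + 1) + j + 1 = (pvS (k + 1) + j) + 1 from rfl, pvWord_succ]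
    have e1 : (pvS (k + 1) + j) / 3 = pvS k + j / 3 + 1 := by omega
    have e2 : (pvS (k + 1) + j) % 3 = j % 3 := by omega
    rw [e1, e2]

lemma myList_length (m : Nat) : ((List.range' 1 m).flatMap pvProdRep).length = pvS m := by
  induction m with
  | zero => rfl
  | succ m ih =>
    rw [show List.range' 1 (m + 1) = List.range' 1 m ++ [1 + 1 * m] from List.range'_concat]
    rw [List.flatMap_append, List.length_append, ih]
    simp only [List.flatMap_cons, List.flatMap_nil, List.append_nil]
    rw [show 1 + 1 * m = m + 1 by ring, prodRep_length]
    rfl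

lemma myList_get (m n : Nat) (h1 : 1 ≤ n) (h2 : n ≤ pvS m) :
    ((List.range' 1 m).flatMap pvProdRep)[n - 1]? = some (pvWord n) := by
  induction m with
  | zero => simp [pvS] at h2; omega
  | succ m ih =>
    rw [show List.range' 1 (m + 1) = List.range' 1 m ++ [1 + 1 * m] from List.range'_concat]
    rw [List.flatMap_append]
    by_cases h : n ≤ pvS m
    · rw [List.getElem?_append_left (by rw [myList_length]; omega)]
      exact ih h
    · rw [List.getElem?_append_right (by rw [myList_length]; omega)]
      rw [myList_length]
      simp only [List.flatMap_cons, List.flatMap_nil, List.append_nil]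
      rw [show 1 + 1 * m = m + 1 by ring]
      have hS : pvS (m + 1) = pvS m + 3 ^ (m + 1) := rfl
      have hj : n - 1 - pvS m < 3 ^ (m + 1) := by omega
      rw [prodRep_get m (n - 1 - pvS m) hj]
      congr 1
      congr 1
      omega

-- the while loop stops at an i with n ≤ S (i-1)
lemma loopA_ge (n : Int) (i : Nat) (hi : 1 ≤ i) :
    n ≤ ((pvS (pvLoopA n ((pvS (i - 1) : Nat) : Int) i - 1) : Nat) : Int) := by
  rw [pvLoopA]
  split
  · rename_i h
    have hstep : ((pvS (i - 1) : Nat) : Int) + 3 ^ i = ((pvS ((i + 1) - 1) : Nat) : Int) := by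
      obtain ⟨j, rfl⟩ : ∃ j, i = j + 1 := ⟨i - 1, by omega⟩
      show _ = ((pvS (j + 1) : Nat) : Int)
      rw [show pvS (j + 1) = pvS j + 3 ^ (j + 1) from rfl]
      push_cast
      simp
    rw [hstep]
    exact loopA_ge n (i + 1) (by omega)
  · rename_i h
    omega
termination_by (n - ((pvS (i - 1) : Nat) : Int)).toNat
decreasing_by
  have h3 : (3:Nat) ≤ 3 ^ i := by
    calc (3:Nat) = 3 ^ 1 := rfl
      _ ≤ 3 ^ i := Nat.pow_le_pow_right (by norm_num) hi
  have hstep : pvS ((i + 1) - 1) = pvS (i - 1) + 3 ^ i := by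
    obtain ⟨j, rfl⟩ : ∃ j, i = j + 1 := ⟨i - 1, by omega⟩
    rfl
  omega

-- B's loop produces the reversed character word
lemma loopB_eq (n : Int) (s : List Char) : pvLoopB n s = s ++ (pvCWord n.toNat).reverse := by
  rw [pvLoopB]
  split
  · rename_i h
    obtain ⟨m, hm⟩ : ∃ m : Nat, n = (m : Int) + 1 := ⟨n.toNat - 1, by omega⟩
    subst hm
    have hq : PySem.Int.floordiv ((m : Int) + 1 - 1) 3 = ((m / 3 : Nat) : Int) := by
      rw [show (m : Int) + 1 - 1 = (m : Int) by ring]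
      exact_mod_cast PySem.Int.floordiv_natCast m 3
    have hr : PySem.Int.mod ((m : Int) + 1 - 1) 3 = ((m % 3 : Nat) : Int) := by
      rw [show (m : Int) + 1 - 1 = (m : Int) by ring]
      exact_mod_cast PySem.Int.mod_natCast m 3
    rw [hq, hr]
    have hc : (PySem.Str.pyGet? "124" ((m % 3 : Nat) : Int)).getD ' ' = pvCh (m % 3) := by
      have hlt : m % 3 < 3 := by omega
      interval_cases h' : m % 3 <;> rfl
    rw [hc]
    rw [loopB_eq ((m / 3 : Nat) : Int) (s ++ [pvCh (m % 3)])]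
    rw [show ((m : Int) + 1).toNat = m + 1 by omega]
    rw [Int.toNat_natCast, pvCWord_succ]
    simp
  · rename_i h
    rw [show n.toNat = 0 by omega]
    simp [pvCWord]
termination_by n.toNat
decreasing_by
  simp only [Int.toNat_natCast]
  omega

-- the Int word maps to the char word, digit by digit
lemma word_cword (m : Nat) :
    (pvWord m).map PySem.Int.toStr = (pvCWord m).map (fun c => String.ofList [c]) := by
  induction m using Nat.strong_induction_on with
  | _ m ih =>
    match m with
    | 0 => rw [pvWord_zero, pvCWord_zero]; rfl
    | k + 1 =>
      rw [pvWord_succ, pvCWord_succ, List.map_append, List.map_append]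
      rw [ih (k / 3) (by omega)]
      congr 1
      have hlt : k % 3 < 3 := by omega
      interval_cases h' : k % 3 <;> decide

-- A's result for n ≥ 1 is the word of n
lemma solution_eq (n : Int) (h : 1 ≤ n) :
    solution n = PySem.Str.join "" ((pvWord n.toNat).map PySem.Int.toStr) := by
  have hge : n ≤ ((pvS (pvLoopA n 0 1 - 1) : Nat) : Int) := by
    have := loopA_ge n 1 (le_refl 1)
    simpa [pvS] using this
  unfold solution
  rw [show n - 1 = ((n.toNat - 1 : Nat) : Int) by omega]
  rw [PySem.List.pyGet?_natCast]
  rw [myList_get (pvLoopA n 0 1 - 1) n.toNat (by omega) (by omega)]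

-- joining the singleton strings of a char list is that char list as a string
lemma join_singletons (cs : List Char) :
    PySem.Str.join "" (cs.map (fun c => String.ofList [c])) = String.ofList cs := by
  apply String.toList_inj.mp
  rw [PySem.Str.toList_join]
  simp only [List.map_map]
  have h1 : (String.toList ∘ fun c => String.ofList [c]) = fun c => [c] := by
    funext c; simp
  rw [h1]
  have h2 : ("" : String).toList = ([] : List Char) := rfl
  rw [h2, PySem.Chars.join_nil_singletons]
  simp

-- ===== VERDICT (by name: the statement is the Claim_ definition above) =====
theorem solution_spec : Claim_equal_solution := by
  intro n _ hpre
  show solution n = solution_alt n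
  rw [solution_eq n hpre, word_cword, join_singletons]
  unfold solution_alt
  rw [loopB_eq]
  simp
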